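-- pv_equiv track=rewrite | github.com/YRazafim/GenCredentials | GenLogins.py | generate_with_formats
-- ===== SOURCE A (Python) =====
-- FORMATS = [("FULL", ".", "FULL", "@domain1.com"), (1, "", "FULL", "")]
--
-- def generate_with_formats(list):
--     variations = []
--
--     for first, last in list:
--         for format in FORMATS:
--             format_first, format_separator, format_last, format_domain = format
--             if (isinstance(format_first, int)):
--                 first = first[:format_first]
--             if (isinstance(format_last, int)):
--                 last = last[:format_last]
--             variations.append(f"{first}{format_separator}{last}{format_domain}")
--
--     return variations
-- ===== SOURCE B (Python) =====
-- def generate_with_formats(list):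
--     return [v
--             for first, last in list
--             for v in (f"{first}.{last}@domain1.com", first[:1] + last)]
-- ===== Notes on version B (the rewrite author's own statement) =====
-- stated objective: simpler
-- what changed: Dropped the FORMATS table and the isinstance-dispatch state machine; a single flat comprehension emits the two login strings per pair directly (with first[:1] for the initial-based form).
import Mathlib
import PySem

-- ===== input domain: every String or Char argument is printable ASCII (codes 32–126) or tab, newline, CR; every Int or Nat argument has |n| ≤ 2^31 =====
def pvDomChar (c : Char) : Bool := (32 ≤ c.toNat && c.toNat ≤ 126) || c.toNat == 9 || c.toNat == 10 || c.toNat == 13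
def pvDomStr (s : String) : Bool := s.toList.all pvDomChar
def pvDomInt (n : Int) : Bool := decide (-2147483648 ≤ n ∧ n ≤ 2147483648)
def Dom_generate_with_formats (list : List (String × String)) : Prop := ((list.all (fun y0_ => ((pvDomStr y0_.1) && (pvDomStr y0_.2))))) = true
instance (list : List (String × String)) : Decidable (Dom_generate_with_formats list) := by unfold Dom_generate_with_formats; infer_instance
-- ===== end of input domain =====

-- B replaces A's FORMATS table and isinstance dispatch with one flat comprehension
-- emitting the two login strings per pair directly (objective: simpler).

-- ===== PORT A =====
-- FORMATS entries hold either an int (Sum.inl) or a string (Sum.inr); the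
-- isinstance(int) test becomes a match on the Sum — exact for this table.
def pvFORMATS : List ((Int ⊕ String) × String × (Int ⊕ String) × String) :=
  [(Sum.inr "FULL", ".", Sum.inr "FULL", "@domain1.com"),
   (Sum.inl 1, "", Sum.inr "FULL", "")]

def generate_with_formats (list : List (String × String)) : List String :=
  (list.foldl (fun variations p =>
    (pvFORMATS.foldl (fun st format =>
      let first := st.1
      let last := st.2.1
      let variations := st.2.2
      let format_first := format.1
      let format_separator := format.2.1
      let format_last := format.2.2.1
      let format_domain := format.2.2.2
      let first := match format_first with
        | Sum.inl k => String.ofList (PySem.List.slice first.toList none (some k))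
        | Sum.inr _ => first
      let last := match format_last with
        | Sum.inl k => String.ofList (PySem.List.slice last.toList none (some k))
        | Sum.inr _ => last
      (first, last, variations ++
        [String.ofList (first.toList ++ format_separator.toList ++ last.toList ++ format_domain.toList)]))
      (p.1, p.2, variations)).2.2) [])

-- ===== PORT B =====
def generate_with_formats_alt (list : List (String × String)) : List String :=
  list.flatMap (fun p =>
    [String.ofList (p.1.toList ++ ".".toList ++ p.2.toList ++ "@domain1.com".toList),
     String.ofList (PySem.List.slice p.1.toList none (some 1) ++ p.2.toList)])

-- ===== PRECONDITION & SPEC =====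
def Spec_generate_with_formats (list : List (String × String)) (out : List String) : Prop := out = generate_with_formats_alt list
instance (list : List (String × String)) (out : List String) : Decidable (Spec_generate_with_formats list out) := by unfold Spec_generate_with_formats; infer_instance

-- ===== CLAIM (what is proved, stated in full; the proofs are below) =====
def Claim_equal_generate_with_formats : Prop := ∀ (list : List (String × String)), Dom_generate_with_formats list → Spec_generate_with_formats list (generate_with_formats list)

-- ===== LEMMAS AND PROOFS =====
lemma pv_foldl_eq (l : List (String × String)) (acc : List String) :
    (l.foldl (fun variations p =>
      (pvFORMATS.foldl (fun st format =>
        let first := st.1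
        let last := st.2.1
        let variations := st.2.2
        let format_first := format.1
        let format_separator := format.2.1
        let format_last := format.2.2.1
        let format_domain := format.2.2.2
        let first := match format_first with
          | Sum.inl k => String.ofList (PySem.List.slice first.toList none (some k))
          | Sum.inr _ => first
        let last := match format_last with
          | Sum.inl k => String.ofList (PySem.List.slice last.toList none (some k))
          | Sum.inr _ => last
        (first, last, variations ++
          [String.ofList (first.toList ++ format_separator.toList ++ last.toList ++ format_domain.toList)]))
        (p.1, p.2, variations)).2.2) acc)
    = acc ++ generate_with_formats_alt l := by
  induction l generalizing acc with
  | nil => simp [generate_with_formats_alt]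
  | cons hd tl ih =>
    rw [List.foldl_cons, ih]
    simp [generate_with_formats_alt, pvFORMATS, List.foldl, List.append_assoc,
      ← String.toList_inj]

-- ===== VERDICT (by name: the statement is the Claim_ definition above) =====
theorem generate_with_formats_spec : Claim_equal_generate_with_formats := by
  intro list _
  unfold Spec_generate_with_formats generate_with_formats
  simpa using pv_foldl_eq list []
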